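-- pv_equiv track=rewrite | github.com/JoelFEscobar/SSI | P11/src/rsa_joel.py | CalculoBloques
-- ===== SOURCE A (Python) =====
-- abecedario='ABCDEFGHIJKLMNOPQRSTUVWXYZ'
--
-- ABCLongitud=len(abecedario)
--
-- def CalculoBloques(Message,n):
--
--     #Calculo del tamaño en el que se divide el mensaje
--
--     j = 2
--     while((ABCLongitud ** j) < n):
--         j = j+1
--
--     #Division del mensaje en bloques de j-1 de tamaño
--     BloquesDelMensaje = []
--     i = 0
--     while(i < len(Message)):
--         BloquesDelMensaje = BloquesDelMensaje + [Message[i:i + j - 1]]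
--         i = i + j - 1
--
--     #Convertimos los bloques a decimal
--     BloquesEnDecimal = []
--     for i in BloquesDelMensaje:
--         Suma = 0
--         Posicion = j-2
--         k = 0
--         while(k < len(i)):
--             #Se suma la ponderación del caracter correspondiente
--             Suma = Suma+ abecedario.find(i[k]) * (ABCLongitud ** Posicion)
--             k = k + 1
--             Posicion = Posicion - 1
--         # Se añade a la lista el bloque en decimal generado
--         BloquesEnDecimal = BloquesEnDecimal + [Suma]
--
--     return BloquesEnDecimal
-- ===== SOURCE B (Python) =====
-- abecedario='ABCDEFGHIJKLMNOPQRSTUVWXYZ'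
--
-- ABCLongitud=len(abecedario)
--
-- def CalculoBloques(Message, n):
--     # smallest j >= 2 with 26**j >= n
--     j = 2
--     while ABCLongitud ** j < n:
--         j += 1
--     w = j - 1
--     # right-pad with 'A' (value 0) to a multiple of w, then peel off
--     # fixed-size blocks, converting each with Horner's method
--     rest = Message + 'A' * ((-len(Message)) % w)
--     out = []
--     while rest:
--         Suma = 0
--         for ch in rest[:w]:
--             Suma = Suma * ABCLongitud + abecedario.find(ch)
--         out.append(Suma)
--         rest = rest[w:]
--     return out
-- ===== Notes on version B (the rewrite author's own statement) =====
-- stated objective: faster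
-- what changed: B right-pads the message with 'A' (value 0) to a multiple of the block size, peels off equal-sized blocks, and converts each with Horner's method (one multiply-add per character), instead of A's index-stepping split with quadratic 'list + [x]' re-concatenation and a fresh 26**Posicion bigint power per character.
import Mathlib
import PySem

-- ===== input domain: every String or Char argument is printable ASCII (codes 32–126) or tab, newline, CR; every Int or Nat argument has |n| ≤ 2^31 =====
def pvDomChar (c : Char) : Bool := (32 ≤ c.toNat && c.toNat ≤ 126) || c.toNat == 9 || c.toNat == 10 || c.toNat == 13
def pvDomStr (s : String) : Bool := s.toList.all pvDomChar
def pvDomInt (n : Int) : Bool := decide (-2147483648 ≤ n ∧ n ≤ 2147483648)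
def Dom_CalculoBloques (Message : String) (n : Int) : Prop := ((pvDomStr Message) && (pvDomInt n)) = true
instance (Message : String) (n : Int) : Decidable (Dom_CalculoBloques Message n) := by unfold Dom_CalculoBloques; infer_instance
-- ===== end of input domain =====

-- B right-pads the message with 'A' (value 0) to a multiple of the block size and
-- converts each equal-sized block by Horner's method (one multiply-add per char),
-- instead of A's index-stepping split and per-character power computation 26**Posicion.

-- ===== PORT A =====
-- abecedario = 'ABCDEFGHIJKLMNOPQRSTUVWXYZ'; abecedario.find(c) on a 1-char slice
def pvAbc : List Char := "ABCDEFGHIJKLMNOPQRSTUVWXYZ".toList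

def pvFind (c : Char) : Int := PySem.Chars.find pvAbc [c]

-- j = 2; while 26**j < n: j += 1    (j is always ≥ 2, so a Nat carries it exactly)
def jLoop (n : Int) (j : Nat) : Nat :=
  if (26 : Int) ^ j < n then jLoop n (j + 1) else j
termination_by (n - 26 ^ j).toNat
decreasing_by
  have h1 : (0 : Int) < 26 ^ j := pow_pos (by norm_num) j
  simp only [pow_succ]
  omega

-- cited by the ports' termination/positivity proofs
theorem jLoop_ge (n : Int) (j : Nat) : j ≤ jLoop n j := by
  unfold jLoop
  split
  · exact le_trans (Nat.le_succ j) (jLoop_ge n (j + 1))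
  · exact le_refl j
termination_by (n - 26 ^ j).toNat
decreasing_by
  have h1 : (0 : Int) < 26 ^ j := pow_pos (by norm_num) j
  simp only [pow_succ]
  omega

theorem jw_pos (n : Int) : 0 < jLoop n 2 - 1 := by
  have := jLoop_ge n 2; omega

-- i = 0; while i < len(Message): Bloques += [Message[i:i+j-1]]; i += j-1
def splitA (msg : List Char) (w : Nat) (hw : 0 < w) (i : Nat) (acc : List (List Char)) :
    List (List Char) :=
  if i < msg.length then
    splitA msg w hw (i + w)
      (acc ++ [PySem.List.slice msg (some (i : Int)) (some ((i : Int) + (w : Int)))])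
  else acc
termination_by msg.length - i
decreasing_by omega

def CalculoBloques (Message : String) (n : Int) : List Int :=
  -- Bloques of size j-1; inner while over k = 0..len(block)-1 reads block[k] in order,
  -- so it is the fold over the block with state (Suma, Posicion).
  -- Posicion ≥ 0 whenever 26 ** Posicion is evaluated (k < len(block) ≤ j-1), so .toNat is exact.
  (splitA Message.toList (jLoop n 2 - 1) (jw_pos n) 0 []).foldl
    (fun acc b =>
      acc ++ [(b.foldl
        (fun sp c => (sp.1 + pvFind c * 26 ^ sp.2.toNat, sp.2 - 1))
        ((0 : Int), ((jLoop n 2 : Nat) : Int) - 2)).1])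
    []

-- ===== PORT B =====
-- rest = padded message; while rest: Horner-convert rest[:w]; rest = rest[w:]
def bLoop (rest : List Char) (w : Nat) (hw : 0 < w) (acc : List Int) : List Int :=
  if h : rest = [] then acc
  else
    bLoop (PySem.List.slice rest (some (w : Int)) none) w hw
      (acc ++ [(PySem.List.slice rest none (some (w : Int))).foldl
        (fun s c => s * 26 + pvFind c) 0])
termination_by rest.length
decreasing_by
  rw [PySem.List.slice_from_natCast]
  have : rest.length ≠ 0 := fun hl => h (List.eq_nil_of_length_eq_zero hl)
  simp; omega

def CalculoBloques_alt (Message : String) (n : Int) : List Int :=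
  -- w = j - 1; rest = Message + 'A' * ((-len(Message)) % w)
  bLoop
    (Message.toList ++
      PySem.List.pyRepeat ['A']
        (PySem.Int.mod (-(Message.toList.length : Int)) ((jLoop n 2 - 1 : Nat) : Int)))
    (jLoop n 2 - 1) (jw_pos n) []

-- ===== PRECONDITION & SPEC =====
def Spec_CalculoBloques (Message : String) (n : Int) (out : List Int) : Prop := out = CalculoBloques_alt Message n
instance (Message : String) (n : Int) (out : List Int) : Decidable (Spec_CalculoBloques Message n out) := by unfold Spec_CalculoBloques; infer_instance

-- ===== CLAIM (what is proved, stated in full; the proofs are below) =====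
def Claim_equal_CalculoBloques : Prop := ∀ (Message : String) (n : Int), Dom_CalculoBloques Message n → Spec_CalculoBloques Message n (CalculoBloques Message n)

-- ===== LEMMAS AND PROOFS =====

-- proof-side middle: blocks of size w, structurally
def chunks (l : List Char) (w : Nat) (hw : 0 < w) : List (List Char) :=
  if l = [] then [] else l.take w :: chunks (l.drop w) w hw
termination_by l.length
decreasing_by
  rename_i h
  have : l.length ≠ 0 := fun hl => h (List.eq_nil_of_length_eq_zero hl)
  simp; omega

def hornerV (l : List Char) : Int := l.foldl (fun s c => s * 26 + pvFind c) 0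

def padN (L w : Nat) : Nat := (PySem.Int.mod (-(L : Int)) ((w : Nat) : Int)).toNat

theorem splitA_eq_chunks (msg : List Char) (w : Nat) (hw : 0 < w) (i : Nat)
    (acc : List (List Char)) :
    splitA msg w hw i acc = acc ++ chunks (msg.drop i) w hw := by
  unfold splitA
  split
  · rename_i hi
    rw [splitA_eq_chunks msg w hw (i + w)]
    have hne : msg.drop i ≠ [] := by
      intro h
      have := congrArg List.length h
      simp at this; omega
    conv_rhs => rw [chunks]
    rw [if_neg hne, PySem.List.slice_natCast_add, List.drop_drop]
    simp [Nat.add_comm]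
  · rename_i hi
    have : msg.drop i = [] := by
      apply List.eq_nil_of_length_eq_zero; simp; omega
    rw [this, chunks, if_pos rfl, List.append_nil]
termination_by msg.length - i
decreasing_by omega

theorem bLoop_eq_map (rest : List Char) (w : Nat) (hw : 0 < w) (acc : List Int) :
    bLoop rest w hw acc = acc ++ (chunks rest w hw).map hornerV := by
  unfold bLoop
  split
  · rename_i h; rw [h, chunks, if_pos rfl]; simp
  · rename_i h
    rw [bLoop_eq_map, PySem.List.slice_from_natCast, PySem.List.slice_to_natCast]
    conv_rhs => rw [chunks]
    rw [if_neg h]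
    simp [hornerV]
termination_by rest.length
decreasing_by
  have h' : rest ≠ [] := by assumption
  have : rest.length ≠ 0 := fun hl => h' (List.eq_nil_of_length_eq_zero hl)
  rw [PySem.List.slice_from_natCast]; simp; omega

theorem hfold (l : List Char) (S : Int) :
    l.foldl (fun s c => s * 26 + pvFind c) S = S * 26 ^ l.length + hornerV l := by
  induction l generalizing S with
  | nil => simp [hornerV]
  | cons c t ih =>
    simp only [List.foldl_cons, List.length_cons]
    rw [ih]
    conv_rhs => rw [hornerV, List.foldl_cons]
    rw [ih (0 * 26 + pvFind c), pow_succ]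
    ring

theorem hornerV_cons (c : Char) (t : List Char) :
    hornerV (c :: t) = pvFind c * 26 ^ t.length + hornerV t := by
  rw [hornerV, List.foldl_cons, hfold]
  ring

theorem hornerV_pad (b : List Char) (k : Nat) :
    hornerV (b ++ List.replicate k 'A') = hornerV b * 26 ^ k := by
  have hA : ∀ m : Nat, hornerV (List.replicate m 'A') = 0 := by
    intro m
    induction m with
    | zero => rfl
    | succ m ih =>
      rw [List.replicate_succ, hornerV_cons, ih]
      have : pvFind 'A' = 0 := by decide
      simp [this]
  rw [hornerV, List.foldl_append, ← hornerV, hfold, List.length_replicate, hA]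
  ring

theorem valA_fold (l : List Char) (S : Int) (m : Nat) (h : l.length ≤ m + 1) :
    (l.foldl (fun sp c => (sp.1 + pvFind c * 26 ^ sp.2.toNat, sp.2 - 1)) (S, ((m : Nat) : Int))).1
      = S + hornerV l * 26 ^ (m + 1 - l.length) := by
  induction l generalizing S m with
  | nil => simp [hornerV]
  | cons c t ih =>
    simp only [List.foldl_cons, Int.toNat_natCast]
    cases m with
    | zero =>
      have ht : t = [] := by
        simp only [List.length_cons] at h
        exact List.eq_nil_of_length_eq_zero (by omega)
      subst ht
      simp [hornerV]
    | succ m' =>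
      have hcast : ((m' + 1 : Nat) : Int) - 1 = ((m' : Nat) : Int) := by push_cast; ring
      have hlt : t.length ≤ m' + 1 := by simp only [List.length_cons] at h; omega
      rw [hcast, ih _ _ hlt, hornerV_cons]
      have hsplit : m' + 1 + 1 - (c :: t).length = m' + 1 - t.length := by
        simp only [List.length_cons]; omega
      rw [hsplit]
      have hpow : (26 : Int) ^ t.length * 26 ^ (m' + 1 - t.length) = 26 ^ (m' + 1) := by
        rw [← pow_add]; congr 1; omega
      calc S + pvFind c * 26 ^ (m' + 1) + hornerV t * 26 ^ (m' + 1 - t.length)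
          = S + (pvFind c * (26 ^ t.length * 26 ^ (m' + 1 - t.length))
              + hornerV t * 26 ^ (m' + 1 - t.length)) := by rw [hpow]; ring
        _ = S + (pvFind c * 26 ^ t.length + hornerV t) * 26 ^ (m' + 1 - t.length) := by ring

theorem padN_zero (w : Nat) (hw : 0 < w) : padN 0 w = 0 := by
  unfold padN
  rw [PySem.Int.mod_eq_emod_of_pos (by exact_mod_cast hw)]
  simp

theorem padN_small (L w : Nat) (hw : 0 < w) (h1 : 0 < L) (h2 : L ≤ w) : padN L w = w - L := by
  unfold padN
  rw [PySem.Int.mod_eq_emod_of_pos (by exact_mod_cast hw)]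
  have he : (-(L : Int)) % (w : Int) = ((w : Int) - (L : Int)) % (w : Int) := by
    conv_lhs => rw [show (-(L : Int)) = ((w : Int) - (L : Int)) + (-1) * (w : Int) by ring]
    rw [Int.add_mul_emod_self_right]
  have hb1 : (0 : Int) ≤ (w : Int) - (L : Int) := by omega
  have hb2 : (w : Int) - (L : Int) < (w : Int) := by omega
  rw [he, Int.emod_eq_of_lt hb1 hb2]
  omega

theorem padN_period (L w : Nat) (hw : 0 < w) (h : w ≤ L) : padN L w = padN (L - w) w := by
  unfold padN
  rw [PySem.Int.mod_eq_emod_of_pos (by exact_mod_cast hw),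
    PySem.Int.mod_eq_emod_of_pos (by exact_mod_cast hw)]
  have he : (-(L : Int)) = (-(((L - w : Nat)) : Int)) + (-1) * (w : Int) := by
    push_cast [h]; ring
  rw [he, Int.add_mul_emod_self_right]

theorem main_chunks (w : Nat) (hw : 0 < w) :
    ∀ (N : Nat) (msg : List Char), msg.length ≤ N →
    (chunks msg w hw).map
        (fun b => (b.foldl (fun sp c => (sp.1 + pvFind c * 26 ^ sp.2.toNat, sp.2 - 1))
          ((0 : Int), ((w - 1 : Nat) : Int))).1)
      = (chunks (msg ++ List.replicate (padN msg.length w) 'A') w hw).map hornerV := by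
  intro N
  induction N with
  | zero =>
    intro msg h
    have hm : msg = [] := List.eq_nil_of_length_eq_zero (by omega)
    subst hm
    simp only [List.length_nil, padN_zero w hw, List.replicate_zero, List.append_nil]
    rw [chunks, if_pos rfl]
    simp
  | succ N ih =>
    intro msg hlen
    by_cases hnil : msg = []
    · subst hnil
      simp only [List.length_nil, padN_zero w hw, List.replicate_zero, List.append_nil]
      rw [chunks, if_pos rfl]
      simp
    · have hLpos : 0 < msg.length := by
        cases msg with
        | nil => exact absurd rfl hnil
        | cons c t => simp
      by_cases hle : msg.length ≤ w
      · -- one (possibly partial) block; the pad completes it to length exactly w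
        have hdrop : msg.drop w = [] :=
          List.eq_nil_of_length_eq_zero (by simp; omega)
        have hpad : padN msg.length w = w - msg.length := padN_small _ _ hw hLpos hle
        have htake : msg.take w = msg := List.take_of_length_le hle
        have hplen : (msg ++ List.replicate (padN msg.length w) 'A').length = w := by
          simp [hpad]; omega
        have hpnil : msg ++ List.replicate (padN msg.length w) 'A' ≠ [] := by
          intro hc
          have := congrArg List.length hc
          rw [hplen] at this; simp at this; omega
        have hpdrop : (msg ++ List.replicate (padN msg.length w) 'A').drop w = [] :=
          List.eq_nil_of_length_eq_zero (by rw [List.length_drop, hplen]; omega)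
        have hptake : (msg ++ List.replicate (padN msg.length w) 'A').take w
            = msg ++ List.replicate (padN msg.length w) 'A' :=
          List.take_of_length_le (by omega)
        conv_lhs => rw [chunks]
        conv_rhs => rw [chunks]
        rw [if_neg hnil, if_neg hpnil, hdrop, hpdrop, chunks, if_pos rfl,
          htake, hptake]
        simp only [List.map_cons, List.map_nil, List.cons.injEq, and_true]
        rw [valA_fold msg 0 (w - 1) (by omega), hornerV_pad, hpad]
        have : w - 1 + 1 - msg.length = w - msg.length := by omega
        rw [this]
        ring
      · -- full first block, recurse on the rest
        rw [not_le] at hle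
        have hple : w ≤ msg.length := le_of_lt hle
        have hptake : (msg ++ List.replicate (padN msg.length w) 'A').take w = msg.take w :=
          List.take_append_of_le_length hple
        have hpdrop : (msg ++ List.replicate (padN msg.length w) 'A').drop w
            = msg.drop w ++ List.replicate (padN msg.length w) 'A' :=
          List.drop_append_of_le_length hple
        have hpnil : msg ++ List.replicate (padN msg.length w) 'A' ≠ [] := by
          intro hc
          exact hnil (List.append_eq_nil_iff.mp hc).1
        have hper : padN msg.length w = padN (msg.drop w).length w := by
          rw [List.length_drop]
          exact padN_period _ _ hw hple
        conv_lhs => rw [chunks]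
        conv_rhs => rw [chunks]
        rw [if_neg hnil, if_neg hpnil, hptake, hpdrop]
        simp only [List.map_cons, List.cons.injEq]
        constructor
        · have htlen : (msg.take w).length = w := by simp; omega
          rw [valA_fold (msg.take w) 0 (w - 1) (by omega), htlen]
          have : w - 1 + 1 - w = 0 := by omega
          rw [this]
          ring
        · rw [hper]
          exact ih (msg.drop w) (by rw [List.length_drop]; omega)

-- ===== VERDICT (by name: the statement is the Claim_ definition above) =====
theorem CalculoBloques_spec : Claim_equal_CalculoBloques := by
  intro Message n _
  unfold Spec_CalculoBloques CalculoBloques CalculoBloques_alt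
  rw [PySem.List.foldl_append_singleton_eq_map, splitA_eq_chunks, bLoop_eq_map,
    PySem.List.pyRepeat_singleton]
  simp only [List.drop_zero, List.nil_append]
  have hpad : (PySem.Int.mod (-(Message.toList.length : Int))
      ((jLoop n 2 - 1 : Nat) : Int)).toNat = padN Message.toList.length (jLoop n 2 - 1) := rfl
  rw [hpad]
  have hj := jLoop_ge n 2
  have hc : ((jLoop n 2 : Nat) : Int) - 2 = (((jLoop n 2 - 1) - 1 : Nat) : Int) := by omega
  rw [hc]
  exact main_chunks (jLoop n 2 - 1) (jw_pos n) Message.toList.length Message.toList le_rfl
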